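-- pv_equiv track=rewrite | github.com/MrKrishnabhagat/Gplan | updated.py | are_adjacent
-- ===== SOURCE A (Python) =====
-- def are_adjacent(grid, block1_id, block2_id):
--     for i in range(len(grid)):
--         for j in range(len(grid[0])):
--             if grid[i][j] == block1_id + 2:
--                 directions = [(0, 1), (1, 0), (0, -1), (-1, 0)]
--                 for di, dj in directions:
--                     ni, nj = i + di, j + dj
--                     if (0 <= ni < len(grid) and 0 <= nj < len(grid[0]) and
--                         grid[ni][nj] == block2_id + 2):
--                         return True
--     return False
-- ===== SOURCE B (Python) =====
-- def are_adjacent(grid, block1_id, block2_id):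
--     t1, t2 = block1_id + 2, block2_id + 2
--     def edge(p, q):
--         return (p == t1 and q == t2) or (p == t2 and q == t1)
--     for row in grid:
--         if any(edge(p, q) for p, q in zip(row, row[1:])):
--             return True
--     for upper, lower in zip(grid, grid[1:]):
--         if any(edge(p, q) for p, q in zip(upper, lower)):
--             return True
--     return False
-- ===== Notes on version B (the rewrite author's own statement) =====
-- stated objective: simpler
-- what changed: A scans coordinates and, at each block1 cell, re-reads the grid in four directions behind explicit bounds checks; B never touches indices: it zips each row with its own tail (horizontal neighbour pairs) and consecutive rows with each other (vertical neighbour pairs) and looks for a pair holding the two target values in either order. Pre_ excludes ragged (non-rectangular) grids, malformed input on which A either raises IndexError (a row shorter than the first) or silently ignores the columns beyond len(grid[0]).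
-- outside the precondition, e.g. on are_adjacent([[0], [3, 4]], 1, 2): A returns False, B returns True
import Mathlib
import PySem

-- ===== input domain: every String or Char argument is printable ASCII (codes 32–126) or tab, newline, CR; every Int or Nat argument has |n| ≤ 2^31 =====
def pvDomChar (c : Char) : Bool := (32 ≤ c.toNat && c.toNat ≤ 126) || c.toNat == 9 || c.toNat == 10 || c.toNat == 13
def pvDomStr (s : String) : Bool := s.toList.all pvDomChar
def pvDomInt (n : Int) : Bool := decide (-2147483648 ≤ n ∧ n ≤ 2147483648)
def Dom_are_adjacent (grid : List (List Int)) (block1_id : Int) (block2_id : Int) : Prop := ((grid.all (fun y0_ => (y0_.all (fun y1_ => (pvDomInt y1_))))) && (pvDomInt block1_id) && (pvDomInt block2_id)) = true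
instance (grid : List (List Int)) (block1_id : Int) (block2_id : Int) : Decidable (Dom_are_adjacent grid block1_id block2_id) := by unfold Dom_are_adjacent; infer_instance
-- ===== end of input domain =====

-- B drops A's coordinate scan with four bounds-checked grid re-reads per cell and instead zips
-- each row with its tail and consecutive rows with each other, looking for an adjacent pair
-- holding the two target values in either order (objective: simpler, index-free).

-- ===== PORT A =====
def are_adjacent (grid : List (List Int)) (block1_id : Int) (block2_id : Int) : Bool :=
  -- for i in range(len(grid)): for j in range(len(grid[0])): …  (early 'return True' = any)
  (PySem.List.pyRange 0 (grid.length : Int)).any (fun i =>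
    (PySem.List.pyRange 0 ((PySem.List.pyGetD grid 0 []).length : Int)).any (fun j =>
      if PySem.List.pyGetD (PySem.List.pyGetD grid i []) j 0 = block1_id + 2 then
        -- directions = [(0,1),(1,0),(0,-1),(-1,0)]
        ([((0:Int),(1:Int)), (1,0), (0,-1), (-1,0)]).any (fun d =>
          let ni := i + d.1
          let nj := j + d.2
          -- grid reads via pyGetD; inside Pre_ every read Python performs is in range
          decide (0 ≤ ni) && decide (ni < (grid.length : Int)) &&
          decide (0 ≤ nj) && decide (nj < ((PySem.List.pyGetD grid 0 []).length : Int)) &&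
          decide (PySem.List.pyGetD (PySem.List.pyGetD grid ni []) nj 0 = block2_id + 2))
      else false))

-- ===== PORT B =====
-- edge(p, q): the pair holds the two target values in either order
def pvEdge (t1 t2 p q : Int) : Bool := (p == t1 && q == t2) || (p == t2 && q == t1)

def are_adjacent_alt (grid : List (List Int)) (block1_id : Int) (block2_id : Int) : Bool :=
  let t1 := block1_id + 2
  let t2 := block2_id + 2
  -- for row in grid: any(edge(p, q) for p, q in zip(row, row[1:]))
  (grid.any (fun row => (row.zip row.tail).any (fun pq => pvEdge t1 t2 pq.1 pq.2))) ||
  -- for upper, lower in zip(grid, grid[1:]): any(edge(p, q) for p, q in zip(upper, lower))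
  ((grid.zip grid.tail).any (fun rr => (rr.1.zip rr.2).any (fun pq => pvEdge t1 t2 pq.1 pq.2)))

-- ===== PRECONDITION & SPEC =====
-- Pre_ restricts to rectangular grids (every row as long as the first): on ragged grids — malformed
-- input for this task — A raises IndexError on a row shorter than the first, and silently ignores
-- the columns beyond len(grid[0]) of a longer row.
def Pre_are_adjacent (grid : List (List Int)) (block1_id : Int) (block2_id : Int) : Prop :=
  ∀ row ∈ grid, row.length = (grid.headD []).length
instance (grid : List (List Int)) (block1_id : Int) (block2_id : Int) : Decidable (Pre_are_adjacent grid block1_id block2_id) := by unfold Pre_are_adjacent; infer_instance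

def pvWitness_are_adjacent : List (List Int) × Int × Int := ([[3, 4], [5, 3]], 1, 2)

def Spec_are_adjacent (grid : List (List Int)) (block1_id : Int) (block2_id : Int) (out : Bool) : Prop := out = are_adjacent_alt grid block1_id block2_id
instance (grid : List (List Int)) (block1_id : Int) (block2_id : Int) (out : Bool) : Decidable (Spec_are_adjacent grid block1_id block2_id out) := by unfold Spec_are_adjacent; infer_instance

-- ===== CLAIM (what is proved, stated in full; the proofs are below) =====
def Claim_equal_are_adjacent : Prop := ∀ (grid : List (List Int)) (block1_id : Int) (block2_id : Int), Dom_are_adjacent grid block1_id block2_id → Pre_are_adjacent grid block1_id block2_id → Spec_are_adjacent grid block1_id block2_id (are_adjacent grid block1_id block2_id)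

-- ===== LEMMAS AND PROOFS =====

theorem pyGetD_zero_headD (xs : List (List Int)) :
    PySem.List.pyGetD xs 0 [] = xs.headD [] := by
  cases xs <;> simp [PySem.List.pyGetD, PySem.List.pyGet?, PySem.List.pyIdx?]

-- "(x, y) is an in-window cell holding value t", exactly A's guarded reads
def Hit (grid : List (List Int)) (t x y : Int) : Prop :=
  0 ≤ x ∧ x < (grid.length : Int) ∧ 0 ≤ y ∧ y < ((grid.headD []).length : Int) ∧
    PySem.List.pyGetD (PySem.List.pyGetD grid x []) y 0 = t

theorem pyGetD_pyGetD_natCast (grid : List (List Int)) (k m : Nat)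
    (hk : k < grid.length) (hm : m < grid[k].length) :
    PySem.List.pyGetD (PySem.List.pyGetD grid (k : Int) []) (m : Int) 0 = grid[k][m] := by
  rw [PySem.List.pyGetD_eq_getElem grid [] (Int.natCast_nonneg k) (by exact_mod_cast hk)]
  simp only [Int.toNat_natCast]
  rw [PySem.List.pyGetD_eq_getElem grid[k] 0 (Int.natCast_nonneg m) (by exact_mod_cast hm)]
  simp

-- under rectangularity, Hit is exactly "nat-indexed cell with value t"
theorem hit_iff (grid : List (List Int))
    (hpre : ∀ row ∈ grid, row.length = (grid.headD []).length) (t x y : Int) :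
    Hit grid t x y ↔
      ∃ k, ∃ (hk : k < grid.length), ∃ m, ∃ (_ : m < grid[k].length),
        x = (k : Int) ∧ y = (m : Int) ∧ grid[k][m] = t := by
  constructor
  · rintro ⟨hx0, hx1, hy0, hy1, hv⟩
    have hk : x.toNat < grid.length := by omega
    have hm : y.toNat < grid[x.toNat].length := by
      rw [hpre grid[x.toNat] (List.getElem_mem hk)]; omega
    refine ⟨x.toNat, hk, y.toNat, hm, by omega, by omega, ?_⟩
    rw [← pyGetD_pyGetD_natCast grid _ _ hk hm, Int.toNat_of_nonneg hx0,
      Int.toNat_of_nonneg hy0]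
    exact hv
  · rintro ⟨k, hk, m, hm, rfl, rfl, hv⟩
    have hw : m < (grid.headD []).length := by
      rw [← hpre grid[k] (List.getElem_mem hk)]; exact hm
    exact ⟨Int.natCast_nonneg k, by exact_mod_cast hk, Int.natCast_nonneg m,
      by exact_mod_cast hw, by rw [pyGetD_pyGetD_natCast grid k m hk hm]; exact hv⟩

theorem A_iff (grid : List (List Int)) (b1 b2 : Int) :
    are_adjacent grid b1 b2 = true ↔
      ∃ x y, Hit grid (b1 + 2) x y ∧
        ∃ d ∈ [((0:Int),(1:Int)), (1,0), (0,-1), (-1,0)],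
          Hit grid (b2 + 2) (x + d.1) (y + d.2) := by
  simp only [are_adjacent, List.any_eq_true, PySem.List.mem_pyRange_one, pyGetD_zero_headD]
  constructor
  · rintro ⟨x, ⟨hx0, hx1⟩, y, ⟨hy0, hy1⟩, hif⟩
    by_cases hc : PySem.List.pyGetD (PySem.List.pyGetD grid x []) y 0 = b1 + 2
    · rw [if_pos hc] at hif
      simp only [List.any_eq_true, Bool.and_eq_true, decide_eq_true_eq] at hif
      obtain ⟨d, hd, ⟨⟨⟨⟨h1, h2⟩, h3⟩, h4⟩, h5⟩⟩ := hif
      exact ⟨x, y, ⟨hx0, hx1, hy0, hy1, hc⟩, d, hd, h1, h2, h3, h4, h5⟩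
    · rw [if_neg hc] at hif; simp at hif
  · rintro ⟨x, y, ⟨hx0, hx1, hy0, hy1, hc⟩, d, hd, h1, h2, h3, h4, h5⟩
    refine ⟨x, ⟨hx0, hx1⟩, y, ⟨hy0, hy1⟩, ?_⟩
    rw [if_pos hc]
    simp only [List.any_eq_true, Bool.and_eq_true, decide_eq_true_eq]
    exact ⟨d, hd, ⟨⟨⟨⟨h1, h2⟩, h3⟩, h4⟩, h5⟩⟩

-- membership in a zip of two lists, in index form
theorem zip_mem_iff {α : Type} (l l' : List α) (pq : α × α) :
    pq ∈ l.zip l' ↔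
      ∃ j, ∃ (h : j < l.length), ∃ (h' : j < l'.length), pq = (l[j], l'[j]) := by
  constructor
  · intro hmem
    obtain ⟨i, hi, heq⟩ := List.mem_iff_getElem.1 hmem
    rw [List.length_zip] at hi
    rw [List.getElem_zip] at heq
    exact ⟨i, by omega, by omega, heq.symm⟩
  · rintro ⟨j, h, h', rfl⟩
    rw [List.mem_iff_getElem]
    exact ⟨j, by rw [List.length_zip]; omega, by rw [List.getElem_zip]⟩

theorem B_iff (grid : List (List Int)) (b1 b2 : Int) :
    are_adjacent_alt grid b1 b2 = true ↔
      (∃ k, ∃ (hk : k < grid.length), ∃ j, ∃ (_ : j + 1 < grid[k].length),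
        pvEdge (b1 + 2) (b2 + 2) grid[k][j] grid[k][j + 1] = true) ∨
      (∃ k, ∃ (hk : k + 1 < grid.length), ∃ j,
        ∃ (_ : j < grid[k].length), ∃ (_ : j < grid[k + 1].length),
        pvEdge (b1 + 2) (b2 + 2) grid[k][j] grid[k + 1][j] = true) := by
  simp only [are_adjacent_alt, Bool.or_eq_true, List.any_eq_true, zip_mem_iff]
  constructor
  · rintro (⟨row, hrow, ⟨pq, ⟨j, hj, hj', rfl⟩, hp⟩⟩ |
            ⟨rr, ⟨k, hk, hk', rfl⟩, pq, ⟨j, hj, hj', rfl⟩, hp⟩)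
    · obtain ⟨k, hk, rfl⟩ := List.mem_iff_getElem.1 hrow
      rw [List.length_tail] at hj'
      refine Or.inl ⟨k, hk, j, by omega, ?_⟩
      simpa only [List.getElem_tail] using hp
    · rw [List.length_tail] at hk'
      simp only [List.getElem_tail] at hj' hp
      exact Or.inr ⟨k, by omega, j, hj, hj', hp⟩
  · rintro (⟨k, hk, j, hj, hp⟩ | ⟨k, hk, j, hj, hj', hp⟩)
    · refine Or.inl ⟨grid[k], List.getElem_mem hk,
        (grid[k][j], grid[k][j + 1]), ⟨j, by omega, by rw [List.length_tail]; omega, ?_⟩, hp⟩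
      simp only [List.getElem_tail]
    · refine Or.inr ⟨(grid[k], grid[k + 1]),
        ⟨k, by omega, by rw [List.length_tail]; omega, by simp only [List.getElem_tail]⟩,
        (grid[k][j], grid[k + 1][j]), ⟨j, hj, by simpa using hj', by simp⟩, hp⟩

theorem pvEdge_iff (t1 t2 p q : Int) :
    pvEdge t1 t2 p q = true ↔ (p = t1 ∧ q = t2) ∨ (p = t2 ∧ q = t1) := by
  simp [pvEdge, Bool.or_eq_true, Bool.and_eq_true]

-- A's four-direction search, with the direction list unfolded
theorem A_iff4 (grid : List (List Int)) (b1 b2 : Int) :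
    are_adjacent grid b1 b2 = true ↔
      ∃ x y, Hit grid (b1 + 2) x y ∧
        (Hit grid (b2 + 2) x (y + 1) ∨ Hit grid (b2 + 2) (x + 1) y ∨
         Hit grid (b2 + 2) x (y - 1) ∨ Hit grid (b2 + 2) (x - 1) y) := by
  rw [A_iff]
  apply exists_congr; intro x
  apply exists_congr; intro y
  apply and_congr_right'
  constructor
  · rintro ⟨d, hd, h⟩
    simp only [List.mem_cons, List.not_mem_nil, or_false] at hd
    rcases hd with rfl | rfl | rfl | rfl <;> norm_num at h <;> tauto
  · rintro (h | h | h | h)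
    · exact ⟨(0, 1), by simp, by norm_num; exact h⟩
    · exact ⟨(1, 0), by simp, by norm_num; exact h⟩
    · exact ⟨(0, -1), by simp, by norm_num; exact h⟩
    · exact ⟨(-1, 0), by simp, by norm_num; exact h⟩

theorem main_eq (grid : List (List Int)) (b1 b2 : Int)
    (hpre : ∀ row ∈ grid, row.length = (grid.headD []).length) :
    are_adjacent grid b1 b2 = are_adjacent_alt grid b1 b2 := by
  rw [Bool.eq_iff_iff, A_iff4, B_iff]
  constructor
  · rintro ⟨x, y, h1, h2⟩
    obtain ⟨k, hk, m, hm, rfl, rfl, hv⟩ := (hit_iff grid hpre _ _ _).1 h1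
    rcases h2 with h2 | h2 | h2 | h2 <;>
      obtain ⟨k', hk', m', hm', he1, he2, hv'⟩ := (hit_iff grid hpre _ _ _).1 h2
    · -- right neighbour: horizontal (t1, t2)
      have e1 : k' = k := by omega
      have e2 : m' = m + 1 := by omega
      simp only [e1, e2] at hm' hv'
      exact Or.inl ⟨k, hk, m, hm', (pvEdge_iff _ _ _ _).2 (Or.inl ⟨hv, hv'⟩)⟩
    · -- down neighbour: vertical (t1, t2)
      have e1 : k' = k + 1 := by omega
      have e2 : m' = m := by omega
      simp only [e1, e2] at hm' hv'
      simp only [e1] at hk'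
      exact Or.inr ⟨k, hk', m, hm, hm', (pvEdge_iff _ _ _ _).2 (Or.inl ⟨hv, hv'⟩)⟩
    · -- left neighbour: horizontal (t2, t1)
      have e1 : k' = k := by omega
      have e2 : m = m' + 1 := by omega
      simp only [e1] at hm' hv'
      simp only [e2] at hm hv
      exact Or.inl ⟨k, hk, m', hm, (pvEdge_iff _ _ _ _).2 (Or.inr ⟨hv', hv⟩)⟩
    · -- up neighbour: vertical (t2, t1)
      have e1 : k = k' + 1 := by omega
      have e2 : m' = m := by omega
      simp only [e1] at hm hv hk
      simp only [e2] at hm' hv'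
      exact Or.inr ⟨k', hk, m, hm', hm, (pvEdge_iff _ _ _ _).2 (Or.inr ⟨hv', hv⟩)⟩
  · rintro (⟨k, hk, j, hj, hp⟩ | ⟨k, hk, j, hj, hj', hp⟩)
    · rcases (pvEdge_iff _ _ _ _).1 hp with ⟨h1, h2⟩ | ⟨h1, h2⟩
      · refine ⟨(k : Int), (j : Int),
          (hit_iff grid hpre _ _ _).2 ⟨k, hk, j, by omega, rfl, rfl, h1⟩, Or.inl ?_⟩
        exact (hit_iff grid hpre _ _ _).2 ⟨k, hk, j + 1, hj, rfl, by push_cast; ring, h2⟩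
      · refine ⟨(k : Int), ((j : Int) + 1),
          (hit_iff grid hpre _ _ _).2 ⟨k, hk, j + 1, hj, rfl, by push_cast; ring, h2⟩,
          Or.inr (Or.inr (Or.inl ?_))⟩
        exact (hit_iff grid hpre _ _ _).2 ⟨k, hk, j, by omega, rfl, by push_cast; ring, h1⟩
    · rcases (pvEdge_iff _ _ _ _).1 hp with ⟨h1, h2⟩ | ⟨h1, h2⟩
      · refine ⟨(k : Int), (j : Int),
          (hit_iff grid hpre _ _ _).2 ⟨k, by omega, j, hj, rfl, rfl, h1⟩,
          Or.inr (Or.inl ?_)⟩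
        exact (hit_iff grid hpre _ _ _).2 ⟨k + 1, hk, j, hj', by push_cast; ring, rfl, h2⟩
      · refine ⟨((k : Int) + 1), (j : Int),
          (hit_iff grid hpre _ _ _).2 ⟨k + 1, hk, j, hj', by push_cast; ring, rfl, h2⟩,
          Or.inr (Or.inr (Or.inr ?_))⟩
        exact (hit_iff grid hpre _ _ _).2 ⟨k, by omega, j, hj, by push_cast; ring, rfl, h1⟩

-- ===== VERDICT (by name: the statement is the Claim_ definition above) =====
theorem are_adjacent_spec : Claim_equal_are_adjacent := by
  intro grid b1 b2 _ hpre
  unfold Spec_are_adjacent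
  exact main_eq grid b1 b2 hpre
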